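-- pv_equiv track=rewrite | github.com/mod96/hiddenlayer | CodingTestExamples/Basic_Algorithms/BS/BS 1.py | solution
-- ===== SOURCE A (Python) =====
-- def solution(budgets, M):
--     budgets.sort()
--     l=len(budgets)
--     if sum(budgets)<=M:
--         return budgets[-1]
--     elif budgets[0]>M/l:
--         return M//l
--     else:
--         left=0
--         right=l-1
--         while left<=right:
--             i=(left+right)//2
--             if sum(budgets[:i])+budgets[i]*(l-i) > M:
--                 right=i-1
--             else:
--                 left=i+1
--
--         temp=sum(budgets[:i])+budgets[i]*(l-i)
--         if temp> M:
--             return (M-sum(budgets[:i]))//(l-i)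
--         elif temp ==M:
--             return budgets[i]
--         else:
--             return (M-sum(budgets[:i+1]))//(l-i-1)
-- ===== SOURCE B (Python) =====
-- def solution(budgets, M):
--     budgets.sort()
--     l = len(budgets)
--     if sum(budgets) <= M:
--         return budgets[-1]
--     acc = 0
--     for i in range(l):
--         cand = (M - acc) // (l - i)
--         if cand < budgets[i]:
--             return cand
--         acc += budgets[i]
-- ===== Notes on version B (the rewrite author's own statement) =====
-- stated objective: simpler
-- what changed: Replaces A's binary search over the cost function plus its three-case post-processing (and the separate float-division cap branch) by a single forward scan over the sorted list with a running prefix sum that returns (M-acc)//(l-i) at the first index where that cap falls below the budget.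
import Mathlib
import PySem

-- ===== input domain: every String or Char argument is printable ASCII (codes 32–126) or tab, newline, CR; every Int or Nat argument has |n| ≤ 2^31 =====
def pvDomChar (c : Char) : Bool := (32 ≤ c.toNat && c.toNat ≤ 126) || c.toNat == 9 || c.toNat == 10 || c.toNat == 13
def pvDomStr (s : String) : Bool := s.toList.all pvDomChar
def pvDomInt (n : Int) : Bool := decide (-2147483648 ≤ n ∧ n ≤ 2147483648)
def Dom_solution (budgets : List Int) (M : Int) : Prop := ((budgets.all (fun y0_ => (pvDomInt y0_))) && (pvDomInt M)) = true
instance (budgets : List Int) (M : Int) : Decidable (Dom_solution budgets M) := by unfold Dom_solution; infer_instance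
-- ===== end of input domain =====

-- B replaces A's binary search plus three-case post-processing by one forward scan over the
-- sorted list (objective: simpler). Both A and B sort `budgets` in place (same side effect);
-- the theorems below are about the return value.

-- ===== PORT A =====
-- A's while loop: left/right binary search; `i` is the leftover loop variable Python keeps
-- after the last iteration (passed along and returned when the loop exits).
def aLoop (bs : List Int) (M l : Int) (left right i : Int) : Int :=
  if h : left ≤ right then
    let m := PySem.Int.floordiv (left + right) 2
    if (PySem.List.slice bs none (some m)).sum + PySem.List.pyGetD bs m 0 * (l - m) > M then
      aLoop bs M l left (m - 1) m
    else
      aLoop bs M l (m + 1) right m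
  else i
termination_by (right + 1 - left).toNat
decreasing_by
  · have := PySem.Int.floordiv_two_mid_bounds h
    omega
  · have := PySem.Int.floordiv_two_mid_bounds h
    omega

def solution (budgets : List Int) (M : Int) : Int :=
  let bs := PySem.List.sorted budgets (fun x => x) false
  let l : Int := bs.length
  if bs.sum ≤ M then PySem.List.pyGetD bs (-1) 0        -- budgets[-1]; Pre_ excludes the IndexError ([] case)
  -- Python tests `budgets[0] > M/l` with FLOAT division; for |M| ≤ 2^31 and any list an int
  -- b satisfies b > M/l exactly when b*l > M (the comparison int-vs-float is exact and M/l
  -- rounds within the gap 1/l around any integer only for l > 2^21, where b*l > M still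
  -- decides identically for in-Dom magnitudes); ported exactly as b*l > M.
  else if PySem.List.pyGetD bs 0 0 * l > M then PySem.Int.floordiv M l
  else
    let i := aLoop bs M l 0 (l - 1) 0
    let temp := (PySem.List.slice bs none (some i)).sum + PySem.List.pyGetD bs i 0 * (l - i)
    if temp > M then PySem.Int.floordiv (M - (PySem.List.slice bs none (some i)).sum) (l - i)
    else if temp = M then PySem.List.pyGetD bs i 0
    else PySem.Int.floordiv (M - (PySem.List.slice bs none (some (i + 1))).sum) (l - i - 1)

-- ===== PORT B =====
-- B's `for i, b in enumerate(budgets)` loop: walk the sorted list with index i and running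
-- prefix sum acc; `[]` is Python's fall-through (unreachable under Pre_: the last iteration
-- always returns once sum > M).
def bLoop (M l : Int) : List Int → Int → Int → Int
  | [], _, _ => 0
  | b :: rest, i, acc =>
      let cand := PySem.Int.floordiv (M - acc) (l - i)
      if cand < b then cand else bLoop M l rest (i + 1) (acc + b)

def solution_alt (budgets : List Int) (M : Int) : Int :=
  let bs := PySem.List.sorted budgets (fun x => x) false
  let l : Int := bs.length
  if bs.sum ≤ M then PySem.List.pyGetD bs (-1) 0
  else bLoop M l bs 0 0

-- ===== PRECONDITION & SPEC =====
-- Pre_ excludes the empty list, on which A always raises IndexError (budgets[-1] or budgets[0]).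
def Pre_solution (budgets : List Int) (M : Int) : Prop := budgets ≠ []
instance (budgets : List Int) (M : Int) : Decidable (Pre_solution budgets M) := by unfold Pre_solution; infer_instance
def pvWitness_solution : List Int × Int := ([1, 3, 2, 5], 9)

def Spec_solution (budgets : List Int) (M : Int) (out : Int) : Prop := out = solution_alt budgets M
instance (budgets : List Int) (M : Int) (out : Int) : Decidable (Spec_solution budgets M out) := by unfold Spec_solution; infer_instance

-- ===== CLAIM (what is proved, stated in full; the proofs are below) =====
def Claim_equal_solution : Prop := ∀ (budgets : List Int) (M : Int), Dom_solution budgets M → Pre_solution budgets M → Spec_solution budgets M (solution budgets M)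

-- ===== LEMMAS AND PROOFS =====

-- prefix sum of the first j elements, and the "total cost if everyone from index j on gets s[j]"
def preI (s : List Int) (j : Int) : Int := (PySem.List.slice s none (some j)).sum
def costI (s : List Int) (j : Int) : Int := preI s j + PySem.List.pyGetD s j 0 * ((s.length : Int) - j)

theorem preI_zero (s : List Int) : preI s 0 = 0 := by
  simp [preI, PySem.List.slice_to]

theorem preI_succ (s : List Int) (j : Int) (h0 : 0 ≤ j) (hj : j < (s.length : Int)) :
    preI s (j + 1) = preI s j + PySem.List.pyGetD s j 0 := by
  have hjn : j.toNat < s.length := by omega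
  rw [preI, preI, PySem.List.slice_to s (by omega), PySem.List.slice_to s h0,
      PySem.List.pyGetD_eq_getElem s 0 h0 hj]
  have h1 : (j + 1).toNat = j.toNat + 1 := by omega
  rw [h1, List.take_add_one, List.getElem?_eq_getElem hjn,
      Option.toList_some, List.sum_append, List.sum_cons, List.sum_nil]
  ring

theorem cost_step (s : List Int) (hs : s.Pairwise (· ≤ ·)) (j : Int)
    (h0 : 0 ≤ j) (hj : j + 1 ≤ (s.length : Int) - 1) : costI s j ≤ costI s (j + 1) := by
  have hjn : j.toNat < s.length := by omega
  have hjn1 : j.toNat + 1 < s.length := by omega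
  have hj1 : ((j + 1).toNat) < s.length := by omega
  have hle : s[j.toNat] ≤ s[(j + 1).toNat] :=
    List.pairwise_iff_getElem.mp hs j.toNat ((j + 1).toNat) hjn hj1 (by omega)
  rw [costI, costI, preI_succ s j h0 (by omega),
      PySem.List.pyGetD_eq_getElem s 0 h0 (by omega),
      PySem.List.pyGetD_eq_getElem s 0 (by omega) (by omega)]
  have hpos : (0 : Int) ≤ (s.length : Int) - j - 1 := by omega
  nlinarith [mul_le_mul_of_nonneg_right hle hpos]

theorem cost_mono (s : List Int) (hs : s.Pairwise (· ≤ ·)) (i j : Int)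
    (h0 : 0 ≤ i) (hij : i ≤ j) (hj : j ≤ (s.length : Int) - 1) : costI s i ≤ costI s j := by
  have hd : ∃ d : Nat, j = i + d := ⟨(j - i).toNat, by omega⟩
  obtain ⟨d, rfl⟩ := hd
  induction d with
  | zero => simp
  | succ d ih =>
      have : (((d : Nat) + 1 : Nat) : Int) = (d : Int) + 1 := by push_cast; ring
      rw [this, show i + ((d : Int) + 1) = (i + d) + 1 by ring]
      exact le_trans (ih (by omega) (by omega)) (cost_step s hs (i + d) (by omega) (by omega))

theorem cost_last (s : List Int) (hne : s ≠ []) : costI s ((s.length : Int) - 1) = s.sum := by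
  have hn : 0 < s.length := List.length_pos_iff.mpr hne
  have hstep := preI_succ s ((s.length : Int) - 1) (by omega) (by omega)
  have hfull : preI s (((s.length : Int) - 1) + 1) = s.sum := by
    rw [preI, PySem.List.slice_to s (by omega)]
    rw [show (((s.length : Int) - 1) + 1).toNat = s.length by omega, List.take_length]
  rw [costI]
  have hmul : ((s.length : Int) - ((s.length : Int) - 1)) = 1 := by ring
  rw [hmul, mul_one]
  omega

-- cand < s[j]  ↔  cost j > M
theorem cand_lt_iff (s : List Int) (M j : Int) (hj : j < (s.length : Int)) :
    (PySem.Int.floordiv (M - preI s j) ((s.length : Int) - j) < PySem.List.pyGetD s j 0) ↔ M < costI s j := by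
  rw [PySem.Int.floordiv_lt_iff_lt_mul (by omega : (0:Int) < (s.length : Int) - j), costI]
  constructor <;> intro h <;> linarith

-- B's scan returns the target value
theorem bLoop_spec (s : List Int) (M : Int) (k : Int)
    (hk0 : 0 ≤ k) (hkn : k ≤ (s.length : Int) - 1) (hkc : M < costI s k)
    (hkl : ∀ j : Int, 0 ≤ j → j < k → costI s j ≤ M) :
    ∀ (t : List Int) (j : Int), 0 ≤ j → t = s.drop j.toNat → j ≤ k →
      bLoop M (s.length : Int) t j (preI s j) =
        PySem.Int.floordiv (M - preI s k) ((s.length : Int) - k) := by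
  intro t
  induction t with
  | nil =>
      intro j hj0 hdrop hjk
      exfalso
      have := congrArg List.length hdrop
      simp [List.length_drop] at this
      omega
  | cons b rest ih =>
      intro j hj0 hdrop hjk
      have hlen := congrArg List.length hdrop
      simp [List.length_drop] at hlen
      have hjn : j.toNat < s.length := by omega
      have hcons : s.drop j.toNat = s[j.toNat] :: s.drop (j.toNat + 1) :=
        List.drop_eq_getElem_cons hjn
      rw [hcons] at hdrop
      obtain ⟨hb, hrest⟩ : b = s[j.toNat] ∧ rest = s.drop (j.toNat + 1) := by
        constructor <;> [exact (List.cons.injEq _ _ _ _ ▸ hdrop).1;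
                         exact (List.cons.injEq _ _ _ _ ▸ hdrop).2]
      have hget : PySem.List.pyGetD s j 0 = s[j.toNat] :=
        PySem.List.pyGetD_eq_getElem s 0 hj0 (by omega)
      rw [bLoop]
      by_cases hjk' : j = k
      · subst hjk'
        have hcond : PySem.Int.floordiv (M - preI s j) ((s.length : Int) - j) < b := by
          rw [hb, ← hget]
          exact (cand_lt_iff s M j (by omega)).mpr hkc
        rw [if_pos hcond]
      · have hjlt : j < k := by omega
        have hcle : costI s j ≤ M := hkl j hj0 hjlt
        rw [if_neg]
        · have h1 : rest = s.drop (j + 1).toNat := by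
            rw [hrest]; congr 1; omega
          have h2 : preI s j + b = preI s (j + 1) := by
            rw [preI_succ s j hj0 (by omega), hget, hb]
          rw [h2]
          exact ih (j + 1) (by omega) h1 (by omega)
        · intro hlt
          rw [hb, ← hget] at hlt
          exact absurd ((cand_lt_iff s M j (by omega)).mp hlt) (by omega)

-- A's binary search ends with i = k-1 or i = k
theorem aLoop_spec (s : List Int) (M : Int) (hs : s.Pairwise (· ≤ ·)) (k : Int)
    (hk0 : 0 ≤ k) (hkn : k ≤ (s.length : Int) - 1) (hkc : M < costI s k)
    (hkl : ∀ j : Int, 0 ≤ j → j < k → costI s j ≤ M) :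
    ∀ (d : Nat) (left right i : Int), (right + 1 - left).toNat ≤ d →
      0 ≤ left → right ≤ (s.length : Int) - 1 → left ≤ right + 1 →
      (∀ j : Int, 0 ≤ j → j < left → costI s j ≤ M) →
      (∀ j : Int, right < j → j ≤ (s.length : Int) - 1 → M < costI s j) →
      (¬ left ≤ right → i = left - 1 ∨ i = right + 1) →
      aLoop s M (s.length : Int) left right i = k - 1 ∨ aLoop s M (s.length : Int) left right i = k := by
  intro d
  induction d with
  | zero =>
      intro left right i hfuel h0 hr hlr hL hR hi
      have hterm : ¬ left ≤ right := by omega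
      rw [aLoop, dif_neg hterm]
      have hleft : left = k := by
        by_contra hne'
        rcases lt_or_gt_of_ne hne' with hlt | hgt
        · -- left < k : but cost left > M while hkl says ≤ M
          have hln : left ≤ (s.length : Int) - 1 := by omega
          exact absurd (hR left (by omega) hln) (by have := hkl left h0 hlt; omega)
        · -- k < left : hL k gives cost k ≤ M, contradiction with hkc
          exact absurd (hL k hk0 hgt) (by omega)
      rcases hi hterm with h | h <;> omega
  | succ d ih =>
      intro left right i hfuel h0 hr hlr hL hR hi
      by_cases hterm : left ≤ right
      · rw [aLoop, dif_pos hterm]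
        simp only [gt_iff_lt]
        have hmb := PySem.Int.floordiv_two_mid_bounds hterm
        set m := PySem.Int.floordiv (left + right) 2 with hm
        have hcost : (PySem.List.slice s none (some m)).sum +
            PySem.List.pyGetD s m 0 * ((s.length : Int) - m) = costI s m := rfl
        rw [hcost]
        by_cases hc : costI s m > M
        · rw [if_pos hc]
          refine ih left (m - 1) m (by omega) h0 (by omega) (by omega) hL ?_ ?_
          · intro j hj1 hj2
            exact lt_of_lt_of_le hc (cost_mono s hs m j (by omega) (by omega) hj2)
          · intro _; right; omega
        · rw [if_neg hc]
          refine ih (m + 1) right m (by omega) (by omega) hr (by omega) ?_ hR ?_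
          · intro j hj0 hj1
            by_cases hjm : j < left
            · exact hL j hj0 hjm
            · have h2 := cost_mono s hs j m hj0 (by omega) (by omega)
              omega
          · intro _; left; omega
      · rw [aLoop, dif_neg hterm]
        have hleft : left = k := by
          by_contra hne'
          rcases lt_or_gt_of_ne hne' with hlt | hgt
          · have hln : left ≤ (s.length : Int) - 1 := by omega
            exact absurd (hR left (by omega) hln) (by have := hkl left h0 hlt; omega)
          · exact absurd (hL k hk0 hgt) (by omega)
        rcases hi hterm with h | h <;> omega

theorem solution_main (budgets : List Int) (M : Int) (hpre : budgets ≠ []) :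
    solution budgets M = solution_alt budgets M := by
  unfold solution solution_alt
  set s := PySem.List.sorted budgets (fun x => x) false with hsdef
  have hsperm : s.Perm budgets := PySem.List.sorted_perm budgets (fun x => x) false
  have hsne : s ≠ [] := by
    intro h
    apply hpre
    have hlen := hsperm.length_eq
    rw [h] at hlen
    simpa using List.length_eq_zero_iff.mp hlen.symm
  have hs : s.Pairwise (· ≤ ·) := by
    simpa using PySem.List.sorted_pairwise budgets (fun x => x)
  have hn1 : 1 ≤ s.length := by
    have := List.length_pos_iff.mpr hsne
    omega
  by_cases hsum : s.sum ≤ M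
  · simp only [if_pos hsum]
  · simp only [if_neg hsum]
    have hsum' : M < s.sum := by omega
    -- k = the least index with costI s k > M
    have hPex : ∃ jn : Nat, M < costI s (jn : Int) := by
      refine ⟨s.length - 1, ?_⟩
      have hc : ((s.length - 1 : Nat) : Int) = (s.length : Int) - 1 := by omega
      rw [hc, cost_last s hsne]
      omega
    have hkc : M < costI s ((Nat.find hPex : Nat) : Int) := Nat.find_spec hPex
    set kN := Nat.find hPex with hkNdef
    have hkn : (kN : Int) ≤ (s.length : Int) - 1 := by
      have h1 : kN ≤ s.length - 1 := Nat.find_min' hPex (by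
        have hc : ((s.length - 1 : Nat) : Int) = (s.length : Int) - 1 := by omega
        rw [hc, cost_last s hsne]
        omega)
      omega
    have hkl : ∀ j : Int, 0 ≤ j → j < (kN : Int) → costI s j ≤ M := by
      intro j hj0 hjk
      have h1 : ¬ M < costI s ((j.toNat : Nat) : Int) :=
        Nat.find_min hPex (by omega)
      have hc : ((j.toNat : Nat) : Int) = j := by omega
      rw [hc] at h1
      omega
    -- B's side: the scan returns the target value
    have hB : bLoop M (s.length : Int) s 0 0 =
        PySem.Int.floordiv (M - preI s (kN : Int)) ((s.length : Int) - (kN : Int)) := by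
      have := bLoop_spec s M (kN : Int) (by omega) hkn hkc hkl s 0 (by omega)
        (by simp) (by omega)
      rwa [preI_zero] at this
    have hcost0 : PySem.List.pyGetD s 0 0 * (s.length : Int) = costI s 0 := by
      rw [costI, preI_zero]
      ring
    by_cases hc0 : PySem.List.pyGetD s 0 0 * (s.length : Int) > M
    · -- A's M//l branch: here k = 0
      simp only [if_pos hc0]
      have hk0 : kN = 0 := by
        rcases Nat.eq_zero_or_pos kN with h | h
        · exact h
        · exact absurd (hkl 0 le_rfl (by omega)) (by rw [hcost0] at hc0; omega)
      rw [hB, hk0]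
      norm_num [preI_zero]
    · simp only [if_neg hc0]
      have hk1 : 1 ≤ kN := by
        rcases Nat.eq_zero_or_pos kN with h | h
        · rw [h] at hkc
          rw [hcost0] at hc0
          simp at hkc
          omega
        · omega
      -- A's binary search: final i is kN-1 or kN
      have hA := aLoop_spec s M hs (kN : Int) (by omega) hkn hkc hkl
        ((s.length : Int) - 1 + 1 - 0).toNat 0 ((s.length : Int) - 1) 0 (le_refl _)
        (le_refl _) (le_refl _) (by omega)
        (by intro j hj0 hj1; omega)
        (by intro j hj1 hj2; omega)
        (by intro h; omega)
      set i := aLoop s M (s.length : Int) 0 ((s.length : Int) - 1) 0 with hidef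
      have htempdef : (PySem.List.slice s none (some i)).sum +
          PySem.List.pyGetD s i 0 * ((s.length : Int) - i) = costI s i := rfl
      simp only [gt_iff_lt]
      rcases hA with hi | hi
      · -- i = k - 1 : temp = costI s (k-1) ≤ M
        have hcle : costI s i ≤ M := by
          rw [hi]
          exact hkl ((kN : Int) - 1) (by omega) (by omega)
        rw [if_neg (by rw [htempdef]; omega)]
        have hpre1 : preI s ((kN : Int) - 1 + 1) = preI s ((kN : Int) - 1) + PySem.List.pyGetD s ((kN : Int) - 1) 0 :=
          preI_succ s ((kN : Int) - 1) (by omega) (by omega)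
        by_cases heq : costI s i = M
        · rw [if_pos (by rw [htempdef]; exact heq)]
          -- budgets[i] = target because the division is exact
          rw [hB, hi]
          rw [hi] at heq
          rw [costI] at heq
          have hpos : (0 : Int) < (s.length : Int) - (kN : Int) := by omega
          have hnum : M - preI s (kN : Int) =
              PySem.List.pyGetD s ((kN : Int) - 1) 0 * ((s.length : Int) - (kN : Int)) := by
            have : preI s (kN : Int) = preI s ((kN : Int) - 1 + 1) := by norm_num
            rw [this, hpre1]
            nlinarith [heq]
          rw [hnum, PySem.Int.floordiv_eq_ediv_of_pos hpos,
              Int.mul_ediv_cancel _ (by omega)]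
        · rw [if_neg (by rw [htempdef]; exact heq)]
          rw [hB, hi]
          have h1 : (kN : Int) - 1 + 1 = (kN : Int) := by ring
          rw [show (PySem.List.slice s none (some ((kN : Int) - 1 + 1))).sum = preI s ((kN : Int) - 1 + 1) from rfl, h1]
          rw [show (s.length : Int) - ((kN : Int) - 1) - 1 = (s.length : Int) - (kN : Int) by ring]
      · -- i = k : temp = costI s k > M
        rw [if_pos (by rw [htempdef, hi]; exact hkc)]
        rw [hB, hi]
        rfl

-- ===== VERDICT (by name: the statement is the Claim_ definition above) =====
theorem solution_spec : Claim_equal_solution := by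
  unfold Claim_equal_solution
  intro budgets M _ hpre
  exact solution_main budgets M hpre
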